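-- pv_equiv track=rewrite | github.com/Team-Joon-CodingTest/Algorithm-study | live4/test44/문제3/김진용.py | solution
-- ===== SOURCE A (Python) =====
-- def solution(players, callings):
--     stack = []
--
--     for call in callings:
--         while True:
--             if call != players[-1]:
--                 stack.append(players.pop())
--             elif call == players[-1]:
--                 break
--
--         call_user = players.pop()
--         temp = players.pop()
--         players.append(call_user)
--         players.append(temp)
--
--         while stack:
--             players.append(stack.pop())
--
--     return players
-- ===== SOURCE B (Python) =====
-- def solution(players, callings):
--     # Walk an index back from the tail to the called runner's current rank,
--     # then swap in place with the runner directly ahead.  Mutates `players`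
--     # like a ranking board; the result is the final ranking.
--     for call in callings:
--         k = len(players) - 1
--         while players[k] != call:
--             k -= 1
--         players[k - 1], players[k] = players[k], players[k - 1]
--     return players
-- ===== Notes on version B (the rewrite author's own statement) =====
-- stated objective: simpler
-- what changed: Replace A's per-call stack machine (pop everyone behind the called player into a stack, swap via two pops and two appends, then push the whole stack back) by a one-line rank computation per call — a single backward index scan — followed by an in-place adjacent swap.
import Mathlib
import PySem

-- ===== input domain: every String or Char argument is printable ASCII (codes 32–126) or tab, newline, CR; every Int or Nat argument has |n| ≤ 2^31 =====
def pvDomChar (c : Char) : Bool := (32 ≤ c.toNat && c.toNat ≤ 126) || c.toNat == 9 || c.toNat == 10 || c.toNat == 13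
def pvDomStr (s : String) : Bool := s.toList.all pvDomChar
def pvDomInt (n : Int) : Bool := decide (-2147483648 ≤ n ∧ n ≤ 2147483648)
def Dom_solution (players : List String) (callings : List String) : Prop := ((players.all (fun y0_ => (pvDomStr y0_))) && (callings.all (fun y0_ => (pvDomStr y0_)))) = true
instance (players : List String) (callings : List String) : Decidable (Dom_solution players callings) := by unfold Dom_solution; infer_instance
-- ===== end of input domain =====

-- B replaces A's per-call stack shuffle by one backward index walk and an in-place
-- adjacent swap per call.  Both Pythons mutate `players` in place; the equivalence
-- proved is about the RETURN value.

-- ===== PORT A =====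
-- inner `while True` loop: pop players from the end onto stack until players[-1] == call.
-- `players.pop()` on a nonempty list is getLast/dropLast; fuel = initial length makes the
-- recursion total (Python raises IndexError when players empties; Pre_ excludes that).
def solFind (call : String) : Nat → List String × List String → List String × List String
  | 0, st => st
  | fuel + 1, (players, stack) =>
    match players.getLast? with
    | none => (players, stack)          -- Python: players[-1] raises IndexError
    | some lastP =>
      if call ≠ lastP then solFind call fuel (players.dropLast, stack ++ [lastP])
      else (players, stack)

-- body of the `for call in callings` loop
def solCall (players : List String) (call : String) : List String :=
  match solFind call players.length (players, []) with
  | (ps, stack) =>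
    match ps.getLast? with
    | none => ps ++ stack.reverse       -- Python: players.pop() raises IndexError
    | some call_user =>
      let ps1 := ps.dropLast
      match ps1.getLast? with
      | none => ps1 ++ [call_user] ++ stack.reverse   -- Python: raises IndexError
      | some temp =>
        -- players.append(call_user); players.append(temp); then drain stack back
        ps1.dropLast ++ [call_user, temp] ++ stack.reverse

def solution (players : List String) (callings : List String) : List String :=
  callings.foldl solCall players

-- ===== PORT B =====
-- `k = len(players) - 1; while players[k] != call: k -= 1`
-- fuel = 2*len+2 covers Python's walk: k runs from len-1 down through the negative
-- wrap-around indices until players[k] raises IndexError (when the call is absent).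
def altFind (arr : List String) (call : String) : Nat → Int → Option Int
  | 0, _ => none
  | fuel + 1, k =>
    match PySem.List.pyGet? arr k with
    | none => none                      -- Python: players[k] raises IndexError
    | some v => if v ≠ call then altFind arr call fuel (k - 1) else some k

-- body of B's `for call in callings` loop
def altStep (arr : List String) (call : String) : List String :=
  match altFind arr call (2 * arr.length + 2) ((arr.length : Int) - 1) with
  | none => arr
  | some k =>
    -- tuple assignment: both right-hand sides read first, then assigned in order
    match PySem.List.pyGet? arr k, PySem.List.pyGet? arr (k - 1) with
    | some vk, some vk1 => PySem.List.pySetD (PySem.List.pySetD arr (k - 1) vk) k vk1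
    | _, _ => arr                       -- IndexError (k is in range: unreachable)

def solution_alt (players : List String) (callings : List String) : List String :=
  callings.foldl altStep players

-- ===== PRECONDITION & SPEC =====
-- spec-level description of one race step: the rank of the called name (its rearmost
-- occurrence) and the adjacent swap there
def lastIdx (arr : List String) (c : String) : Nat :=
  arr.length - 1 - arr.reverse.idxOf c

def swapStep (arr : List String) (c : String) : List String :=
  let k := lastIdx arr c
  if k = 0 ∨ arr.length ≤ k then arr
  else (arr.set (k - 1) c).set k (arr.getD (k - 1) "")

-- the race runs to completion: every call names a player who is present and not leading
def raceOk : List String → List String → Bool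
  | _, [] => true
  | arr, c :: rest =>
    (decide (c ∈ arr) && decide (lastIdx arr c ≠ 0)) && raceOk (swapStep arr c) rest

-- Pre_ holds exactly when A returns: it excludes only the inputs on which A raises
-- IndexError — a call naming an absent player or the player currently in first place
-- (a trace property of the evolving ranking, stated by the spec step above).
def Pre_solution (players : List String) (callings : List String) : Prop :=
  raceOk players callings = true
instance (players : List String) (callings : List String) : Decidable (Pre_solution players callings) := by unfold Pre_solution; infer_instance

def pvWitness_solution : List String × List String := (["a", "b", "c"], ["b", "c", "c"])

def Spec_solution (players : List String) (callings : List String) (out : List String) : Prop := out = solution_alt players callings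
instance (players : List String) (callings : List String) (out : List String) : Decidable (Spec_solution players callings out) := by unfold Spec_solution; infer_instance

-- ===== CLAIM (what is proved, stated in full; the proofs are below) =====
def Claim_equal_solution : Prop := ∀ (players : List String) (callings : List String), Dom_solution players callings → Pre_solution players callings → Spec_solution players callings (solution players callings)

-- ===== LEMMAS AND PROOFS =====

-- A's inner loop peels an un-called suffix onto the stack
lemma solFind_peel (c : String) (suf : List String) (hns : c ∉ suf) :
    ∀ (ps stack : List String) (fuel : Nat), suf.length + 1 ≤ fuel →
      ps.getLast? = some c →
      solFind c fuel (ps ++ suf, stack) = (ps, stack ++ suf.reverse) := by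
  induction suf using List.reverseRecOn with
  | nil =>
    intro ps stack fuel hf hl
    obtain ⟨f, rfl⟩ : ∃ f, fuel = f + 1 := ⟨fuel - 1, by omega⟩
    simp [solFind, hl]
  | append_singleton l x ih =>
    intro ps stack fuel hf hl
    obtain ⟨f, rfl⟩ : ∃ f, fuel = f + 1 := ⟨fuel - 1, by omega⟩
    simp only [List.mem_append, List.mem_singleton, not_or] at hns
    have hgl : (ps ++ (l ++ [x])).getLast? = some x := by simp
    have hxc : c ≠ x := hns.2
    have hdl : (ps ++ (l ++ [x])).dropLast = ps ++ l := by
      rw [← List.append_assoc]; simp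
    simp only [solFind, hgl, if_pos hxc, hdl]
    rw [ih hns.1 ps (stack ++ [x]) f (by simp at hf ⊢; omega) hl]
    simp

-- A's per-call step is the swap at the last occurrence
lemma solCall_eq (pre suf : List String) (a c : String) (hc : c ∉ suf) :
    solCall (pre ++ a :: c :: suf) c = pre ++ c :: a :: suf := by
  have h1 : pre ++ a :: c :: suf = (pre ++ [a, c]) ++ suf := by simp
  have hl : (pre ++ [a, c]).getLast? = some c := by simp
  have hfind : solFind c ((pre ++ [a, c]) ++ suf).length ((pre ++ [a, c]) ++ suf, []) =
      (pre ++ [a, c], [] ++ suf.reverse) := by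
    apply solFind_peel c suf hc _ _ _ (by simp; omega) hl
  unfold solCall
  rw [h1, hfind]
  have h2 : (pre ++ [a, c]).dropLast = pre ++ [a] := by
    have h3 : pre ++ [a, c] = (pre ++ [a]) ++ [c] := by simp
    rw [h3]; simp
  simp [hl, h2]

-- the double set is the swap
lemma set_set_swap (a c x : String) (suf : List String) :
    ∀ (pre : List String),
      ((pre ++ a :: c :: suf).set pre.length x).set (pre.length + 1) a = pre ++ x :: a :: suf := by
  intro pre
  induction pre with
  | nil => simp
  | cons y t _ => simp

-- getElem facts at the swap site
lemma getElem_mid0 (pre suf : List String) (a c : String) :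
    (pre ++ a :: c :: suf)[pre.length]'(by simp) = a := by
  rw [List.getElem_append_right (Nat.le_refl pre.length)]
  simp

lemma getElem_mid1 (pre suf : List String) (a c : String) :
    (pre ++ a :: c :: suf)[pre.length + 1]'(by simp) = c := by
  rw [List.getElem_append_right (by omega : pre.length ≤ pre.length + 1)]
  simp

-- decomposition at the LAST occurrence of the called player
lemma last_decomp : ∀ (arr : List String) (c : String), c ∈ arr →
    ∃ pre suf, arr = pre ++ c :: suf ∧ c ∉ suf ∧ arr.reverse.idxOf c = suf.length := by
  intro arr
  induction arr using List.reverseRecOn with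
  | nil => intro c hm; cases hm
  | append_singleton t x ih =>
    intro c hm
    by_cases hcx : c = x
    · exact ⟨t, [], by simp [hcx], by simp, by simp [hcx]⟩
    · have hct : c ∈ t := by
        rcases List.mem_append.1 hm with h | h
        · exact h
        · simp at h; exact absurd h hcx
      obtain ⟨pre, suf, heq, hns, hidx⟩ := ih c hct
      refine ⟨pre, suf ++ [x], by rw [heq]; simp, ?_, ?_⟩
      · simp only [List.mem_append, List.mem_singleton, not_or]
        exact ⟨hns, hcx⟩
      · rw [List.reverse_append, List.reverse_singleton, List.singleton_append,
          List.idxOf_cons_ne _ (fun h => hcx h.symm), hidx]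
        simp

-- B's index walk stops at the last occurrence of the called player
lemma altFind_go (c : String) : ∀ (suf ps rest : List String), c ∉ suf →
    ps.getLast? = some c → ∀ fuel, suf.length + 1 ≤ fuel →
    altFind (ps ++ suf ++ rest) c fuel (((ps ++ suf).length : Int) - 1)
      = some ((ps.length : Int) - 1) := by
  intro suf
  induction suf using List.reverseRecOn with
  | nil =>
    intro ps rest _ hl fuel hf
    obtain ⟨f, rfl⟩ : ∃ f, fuel = f + 1 := ⟨fuel - 1, by omega⟩
    have hne : ps ≠ [] := by intro h; rw [h] at hl; simp at hl
    have hlen : 0 < ps.length := List.length_pos_iff.mpr hne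
    simp only [List.append_nil]
    have hcast : ((ps.length : Int)) - 1 = ((ps.length - 1 : Nat) : Int) := by omega
    have hget : PySem.List.pyGet? (ps ++ rest) (((ps.length - 1 : Nat) : Int)) = some c := by
      rw [PySem.List.pyGet?_natCast, List.getElem?_append_left (by omega),
        ← List.getLast?_eq_getElem?, hl]
    rw [hcast]
    simp [altFind, hget]
  | append_singleton l x ih =>
    intro ps rest hns hl fuel hf
    obtain ⟨f, rfl⟩ : ∃ f, fuel = f + 1 := ⟨fuel - 1, by omega⟩
    simp only [List.mem_append, List.mem_singleton, not_or] at hns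
    have hxc : c ≠ x := hns.2
    have hre2 : ps ++ (l ++ [x]) ++ rest = (ps ++ l) ++ (x :: rest) := by simp
    have hcast : ((ps ++ (l ++ [x])).length : Int) - 1 = ((ps ++ l).length : Int) := by
      simp; omega
    have hget : PySem.List.pyGet? (ps ++ (l ++ [x]) ++ rest) (((ps ++ l).length : Nat) : Int)
        = some x := by
      rw [hre2, PySem.List.pyGet?_natCast, List.getElem?_append_right (Nat.le_refl _)]
      simp
    rw [hcast]
    simp only [altFind, hget]
    have := ih ps (x :: rest) hns.1 hl f (by simp at hf ⊢; omega)
    rw [hre2, this, if_pos (Ne.symm hxc)]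

-- main loop: under the completing-race condition both folds produce the same ranking
lemma main_loop : ∀ (cs arr : List String), raceOk arr cs = true →
    cs.foldl solCall arr = cs.foldl altStep arr := by
  intro cs
  induction cs with
  | nil => intro arr _; rfl
  | cons c rest ih =>
    intro arr hok
    simp only [raceOk, Bool.and_eq_true, decide_eq_true_eq] at hok
    obtain ⟨⟨hmem, h0⟩, hrest⟩ := hok
    obtain ⟨pre', suf, harr, hcsuf, hidx⟩ := last_decomp arr c hmem
    have hlast : lastIdx arr c = pre'.length := by
      unfold lastIdx
      rw [hidx, harr]
      simp only [List.length_append, List.length_cons]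
      omega
    have hpre' : pre' ≠ [] := by
      intro h
      rw [h] at hlast
      simp at hlast
      exact h0 (hlast ▸ rfl)
    obtain ⟨pre, a, rfl⟩ : ∃ pre a, pre' = pre ++ [a] := by
      rcases List.eq_nil_or_concat pre' with h | ⟨pre, a, h⟩
      · exact absurd h hpre'
      · exact ⟨pre, a, by simpa using h⟩
    rw [List.append_assoc, List.singleton_append] at harr
    subst harr
    set p := pre.length with hp
    have hplen : lastIdx (pre ++ a :: c :: suf) c = p + 1 := by
      rw [hlast]; simp [hp]
    set arr' : List String := pre ++ c :: a :: suf with harr'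
    -- A's step
    have hA : solCall (pre ++ a :: c :: suf) c = arr' := solCall_eq pre suf a c hcsuf
    -- spec step
    have hgetp : (pre ++ a :: c :: suf).getD p "" = a := by
      rw [List.getD_eq_getElem _ _ (by simp [hp]), getElem_mid0]
    have hS : swapStep (pre ++ a :: c :: suf) c = arr' := by
      unfold swapStep
      rw [hplen]
      have hnot : ¬ (p + 1 = 0 ∨ (pre ++ a :: c :: suf).length ≤ p + 1) := by
        simp only [not_or]
        constructor
        · omega
        · simp [hp]
      rw [if_neg hnot]
      simp only [Nat.add_sub_cancel, hgetp]
      exact set_set_swap a c c suf pre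
    -- B's step
    have hfind : altFind (pre ++ a :: c :: suf) c (2 * (pre ++ a :: c :: suf).length + 2)
        (((pre ++ a :: c :: suf).length : Int) - 1) = some (((p + 1 : Nat) : Int)) := by
      have h1 : pre ++ a :: c :: suf = ((pre ++ [a, c]) ++ suf) ++ [] := by simp
      have h2 : (((pre ++ a :: c :: suf).length : Int) - 1)
          = (((pre ++ [a, c]) ++ suf).length : Int) - 1 := by simp
      have h3 : ((pre ++ [a, c]).length : Int) - 1 = ((p + 1 : Nat) : Int) := by
        simp [hp]; omega
      rw [h2, ← h3]
      conv_lhs => rw [h1]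
      exact altFind_go c suf (pre ++ [a, c]) [] hcsuf (by simp) _ (by simp; omega)
    have hgk : PySem.List.pyGet? (pre ++ a :: c :: suf) (((p + 1 : Nat) : Int)) = some c := by
      rw [PySem.List.pyGet?_natCast, List.getElem?_eq_getElem (by simp [hp]), getElem_mid1]
    have hgk1 : PySem.List.pyGet? (pre ++ a :: c :: suf) (((p + 1 : Nat) : Int) - 1) = some a := by
      have h1 : ((p + 1 : Nat) : Int) - 1 = ((p : Nat) : Int) := by omega
      rw [h1, PySem.List.pyGet?_natCast, List.getElem?_eq_getElem (by simp [hp]), getElem_mid0]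
    have hB : altStep (pre ++ a :: c :: suf) c = arr' := by
      unfold altStep
      rw [hfind]
      simp only [hgk, hgk1]
      have h1 : ((p + 1 : Nat) : Int) - 1 = ((p : Nat) : Int) := by omega
      rw [h1, PySem.List.pySetD_natCast, PySem.List.pySetD_natCast]
      exact set_set_swap a c c suf pre
    calc (c :: rest).foldl solCall (pre ++ a :: c :: suf)
        = rest.foldl solCall arr' := by rw [List.foldl_cons, hA]
      _ = rest.foldl altStep arr' := ih arr' (by rw [← hS]; exact hrest)
      _ = (c :: rest).foldl altStep (pre ++ a :: c :: suf) := by rw [List.foldl_cons, hB]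

-- ===== VERDICT (by name: the statement is the Claim_ definition above) =====
theorem solution_spec : Claim_equal_solution := by
  intro players callings _ hpre
  unfold Spec_solution solution solution_alt
  exact main_loop callings players hpre
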